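-- pv_equiv track=rewrite | github.com/Yadkee/ProjectEuler | problems[001-025]/problem023.py | sdivisors_until
-- ===== SOURCE A (Python) =====
-- def sdivisors_until(m):
--     """Sum of divisors generator"""
--     yield 0
--     yield 1
--     sieve = [1] * m
--     for i in range(2, m):
--         yield sieve[i]
--         for mul in range(i, m, i):
--             sieve[mul] += i
-- ===== SOURCE B (Python) =====
-- def sdivisors_until(m):
--     """Sum of proper divisors generator: enumerate factor pairs (d, q), d <= q."""
--     yield 0
--     yield 1
--     res = [0] * m
--     for d in range(1, m):
--         for q in range(d, (m - 1) // d + 1):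
--             k = d * q
--             if d == 1:
--                 res[k] += 1
--             elif q == d:
--                 res[k] += d
--             else:
--                 res[k] += d + q
--     for i in range(2, m):
--         yield res[i]
-- ===== Notes on version B (the rewrite author's own statement) =====
-- stated objective: alternative
-- what changed: Replaces the interleaved harmonic divisor sieve (for each i, add i to all its multiples while yielding) by a factor-pair enumeration: for each d the pairs (d,q) with d<=q and d*q<m contribute d and q (the cofactor) to res[d*q], then the finished table is yielded.
import Mathlib
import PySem

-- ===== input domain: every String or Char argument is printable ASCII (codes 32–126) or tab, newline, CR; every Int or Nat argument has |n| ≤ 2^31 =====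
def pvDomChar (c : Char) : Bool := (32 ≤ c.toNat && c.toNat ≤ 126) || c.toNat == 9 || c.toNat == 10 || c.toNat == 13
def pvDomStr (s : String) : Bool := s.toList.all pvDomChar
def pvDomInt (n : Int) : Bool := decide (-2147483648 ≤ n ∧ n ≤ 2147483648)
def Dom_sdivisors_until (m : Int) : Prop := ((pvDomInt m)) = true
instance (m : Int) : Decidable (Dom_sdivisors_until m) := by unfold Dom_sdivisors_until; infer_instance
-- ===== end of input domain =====

-- B replaces A's interleaved harmonic divisor sieve by a factor-pair enumeration
-- (each pair (d, q), d ≤ q, d*q < m, contributes d and its cofactor q to res[d*q]);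
-- same cost class, alternative algorithm. Both generators are compared as their
-- list of yielded values.

-- ===== PORT A =====
-- one iteration of A's outer loop: yield sieve[i] (read before the updates), then
-- sieve[mul] += i for mul in range(i, m, i); indices are always in range, so the
-- total pyGetD/pySetD forms are exact here
def astep (m : Int) (st : List Int × List Int) (i : Int) : List Int × List Int :=
  ((PySem.List.pyRange i m i).foldl
      (fun s mul => PySem.List.pySetD s mul (PySem.List.pyGetD s mul 0 + i)) st.1,
   st.2 ++ [PySem.List.pyGetD st.1 i 0])

def sdivisors_until (m : Int) : List Int :=
  0 :: 1 :: ((PySem.List.pyRange 2 m 1).foldl (astep m) (List.replicate m.toNat 1, [])).2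

-- ===== PORT B =====
-- inner loop of Source B for a fixed d: for q in range(d, (m-1)//d + 1), add the pair
-- contribution to res[d*q]; indices d*q are in [0, m), so pySetD/pyGetD are exact
def bstep (m : Int) (res : List Int) (d : Int) : List Int :=
  (PySem.List.pyRange d (PySem.Int.floordiv (m - 1) d + 1) 1).foldl
    (fun res q =>
      let k := d * q
      if d = 1 then PySem.List.pySetD res k (PySem.List.pyGetD res k 0 + 1)
      else if q = d then PySem.List.pySetD res k (PySem.List.pyGetD res k 0 + d)
      else PySem.List.pySetD res k (PySem.List.pyGetD res k 0 + (d + q))) res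

def sdivisors_until_alt (m : Int) : List Int :=
  let res := (PySem.List.pyRange 1 m 1).foldl (bstep m) (List.replicate m.toNat 0)
  0 :: 1 :: (PySem.List.pyRange 2 m 1).map (fun i => PySem.List.pyGetD res i 0)

-- ===== PRECONDITION & SPEC =====
def Spec_sdivisors_until (m : Int) (out : List Int) : Prop := out = sdivisors_until_alt m
instance (m : Int) (out : List Int) : Decidable (Spec_sdivisors_until m out) := by unfold Spec_sdivisors_until; infer_instance

-- ===== CLAIM (what is proved, stated in full; the proofs are below) =====
def Claim_equal_sdivisors_until : Prop := ∀ (m : Int), Dom_sdivisors_until m → Spec_sdivisors_until m (sdivisors_until m)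

-- ===== LEMMAS AND PROOFS =====

-- the sum of the divisors d ∈ [2, j) of k (with d ≤ k, which is how A's sieve
-- accumulates them: divisor d only ever updates indices ≥ d)
def SA (j : Int) (k : Nat) : Int :=
  ((PySem.List.pyRange 2 j 1).filter (fun d => decide (d ∣ (k : Int) ∧ d ≤ (k : Int)))).sum

-- the model of one yielded value: 1 + (sum of divisors of i in [2, i))
def psum (i : Int) : Int := 1 + SA i i.toNat

-- B's pair contribution of a fixed d to entry k
def gB (d q : Int) : Int := if d = 1 then 1 else if q = d then d else d + q

def CB (m d : Int) (k : Nat) : Int :=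
  if d ∣ (k : Int) ∧ d * d ≤ (k : Int) ∧ (k : Int) < m then gB d ((k : Int) / d) else 0

-- generic sieve-update fold: adding g q at index φ q for each q
theorem foldl_update_add (qs : List Int) (φ g : Int → Int) (s : List Int)
    (hr : ∀ q ∈ qs, 0 ≤ φ q ∧ φ q < (s.length : Int)) :
    ((qs.foldl (fun t q => PySem.List.pySetD t (φ q) (PySem.List.pyGetD t (φ q) 0 + g q)) s).length = s.length)
    ∧ ∀ k : Nat,
      (qs.foldl (fun t q => PySem.List.pySetD t (φ q) (PySem.List.pyGetD t (φ q) 0 + g q)) s).getD k 0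
        = s.getD k 0 + ((qs.filter (fun q => φ q == (k : Int))).map g).sum := by
  induction qs generalizing s with
  | nil => simp
  | cons q qs ih =>
    obtain ⟨h0, h1⟩ := hr q (List.mem_cons_self ..)
    have hlen1 : (PySem.List.pySetD s (φ q) (PySem.List.pyGetD s (φ q) 0 + g q)).length
        = s.length := PySem.List.length_pySetD ..
    obtain ⟨ihl, ihe⟩ := ih (PySem.List.pySetD s (φ q) (PySem.List.pyGetD s (φ q) 0 + g q))
      (by rw [hlen1]; intro q' hq'; exact hr q' (List.mem_cons_of_mem _ hq'))
    refine ⟨by simpa [hlen1] using ihl, fun k => ?_⟩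
    have hstep : (PySem.List.pySetD s (φ q) (PySem.List.pyGetD s (φ q) 0 + g q)).getD k 0
        = s.getD k 0 + (if φ q = (k : Int) then g q else 0) := by
      rw [PySem.List.pySetD_of_nonneg s _ h0,
          PySem.List.pyGetD_eq_getElem s 0 h0 h1]
      have hn : (φ q).toNat < s.length := by omega
      by_cases hk : φ q = (k : Int)
      · have hts : (φ q).toNat = k := by omega
        have hkl : k < s.length := hts ▸ hn
        simp [hk, List.getD_eq_getElem?_getD, hkl]
      · have hne : (φ q).toNat ≠ k := by omega
        simp [hk, List.getD_eq_getElem?_getD, hne]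
    rw [List.foldl_cons, ihe k, hstep]
    by_cases hk : φ q = (k : Int)
    · simp [hk]; ring
    · simp [hk]

theorem sum_filter_map_of_none (l : List Int) (φ g : Int → Int) (k : Int)
    (hnone : ∀ q ∈ l, φ q ≠ k) :
    ((l.filter (fun q => φ q == k)).map g).sum = 0 := by
  induction l with
  | nil => simp
  | cons a l ih =>
    have ha := hnone a (List.mem_cons_self ..)
    rw [List.filter_cons]
    simp only [beq_iff_eq, ha, if_false]
    exact ih (fun q hq => hnone q (List.mem_cons_of_mem _ hq))

theorem sum_filter_map_of_mem (l : List Int) (φ g : Int → Int) (k q₀ : Int)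
    (hnd : l.Nodup) (hinj : ∀ a ∈ l, ∀ b ∈ l, φ a = φ b → a = b)
    (hq : q₀ ∈ l) (hφ : φ q₀ = k) :
    ((l.filter (fun q => φ q == k)).map g).sum = g q₀ := by
  induction l with
  | nil => simp at hq
  | cons a l ih =>
    rw [List.filter_cons]
    rcases List.mem_cons.1 hq with rfl | hq'
    · simp only [hφ, beq_self_eq_true, if_true, List.map_cons, List.sum_cons]
      have h0 : ((l.filter (fun q => φ q == k)).map g).sum = 0 := by
        refine sum_filter_map_of_none l φ g k (fun q hq => ?_)
        intro hc
        have : q = q₀ := hinj q (List.mem_cons_of_mem _ hq) q₀ (List.mem_cons_self ..)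
          (hc.trans hφ.symm)
        exact (List.nodup_cons.1 hnd).1 (this ▸ hq)
      rw [h0]; ring
    · by_cases hak : φ a = k
      · exfalso
        have : a = q₀ := hinj a (List.mem_cons_self ..) q₀ hq (hak.trans hφ.symm)
        exact (List.nodup_cons.1 hnd).1 (this ▸ hq')
      · simp only [beq_iff_eq, hak, if_false]
        exact ih (List.nodup_cons.1 hnd).2
          (fun x hx y hy => hinj x (List.mem_cons_of_mem _ hx) y (List.mem_cons_of_mem _ hy))
          hq' 

theorem nodup_pyRange_pos (a b s : Int) (hs : 0 < s) : (PySem.List.pyRange a b s).Nodup := by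
  rw [PySem.List.pyRange_of_pos a b hs]
  refine List.Nodup.map ?_ (List.nodup_range)
  intro x y h
  have hx : s * (x : Int) = s * (y : Int) := by
    simpa using h
  have := mul_left_cancel₀ (ne_of_gt hs) hx
  exact_mod_cast this

-- A's outer loop: with the sieve holding 1 + SA j · , processing i = j, …, m-1
-- appends exactly the model values
theorem A_loop (m : Int) : ∀ (n : Nat) (j : Int), (m - j).toNat = n → 2 ≤ j → j ≤ m →
    ∀ (s out : List Int), s.length = m.toNat →
    (∀ k : Nat, k < m.toNat → s.getD k 0 = 1 + SA j k) →
    ((PySem.List.pyRange j m 1).foldl (astep m) (s, out)).2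
      = out ++ (PySem.List.pyRange j m 1).map psum := by
  intro n
  induction n with
  | zero =>
    intro j hn h2 hjm s out hlen hinv
    have hj : m ≤ j := by omega
    rw [PySem.List.pyRange_one_eq_nil hj]
    simp
  | succ n ih =>
    intro j hn h2 hjm s out hlen hinv
    have hjm' : j < m := by omega
    have hmn : ((m.toNat : Int)) = m := by omega
    have hj0 : (0 : Int) < j := by omega
    rw [PySem.List.pyRange_one_cons hjm']
    -- the value yielded at i = j
    have hjlen : (j : Int) < (s.length : Int) := by rw [hlen]; omega
    have hyield : PySem.List.pyGetD s j 0 = psum j := by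
      rw [PySem.List.pyGetD_eq_getElem s 0 (by omega) hjlen]
      have hjn : j.toNat < m.toNat := by omega
      have := hinv j.toNat hjn
      rw [List.getD_eq_getElem] at this
      · rw [this]; unfold psum; rfl
      · omega
    -- the sieve after the inner loop of i = j
    have hr : ∀ q ∈ PySem.List.pyRange j m j, 0 ≤ q ∧ q < (s.length : Int) := by
      intro q hq
      obtain ⟨hq1, hq2, -⟩ := (PySem.List.mem_pyRange_iff_of_pos hj0 q).1 hq
      constructor <;> omega
    have hupd := foldl_update_add (PySem.List.pyRange j m j) (fun q => q) (fun _ => j) s hr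
    have hlen' : ((PySem.List.pyRange j m j).foldl
        (fun s mul => PySem.List.pySetD s mul (PySem.List.pyGetD s mul 0 + j)) s).length
        = m.toNat := by
      have := hupd.1
      simpa [hlen] using this
    have hinv' : ∀ k : Nat, k < m.toNat →
        ((PySem.List.pyRange j m j).foldl
          (fun s mul => PySem.List.pySetD s mul (PySem.List.pyGetD s mul 0 + j)) s).getD k 0
        = 1 + SA (j + 1) k := by
      intro k hk
      have he : ((PySem.List.pyRange j m j).foldl
          (fun s mul => PySem.List.pySetD s mul (PySem.List.pyGetD s mul 0 + j)) s).getD k 0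
          = s.getD k 0 + (((PySem.List.pyRange j m j).filter
              (fun q => q == (k : Int))).map (fun _ => j)).sum := by
        simpa using hupd.2 k
      have hsum : (((PySem.List.pyRange j m j).filter
          (fun q => q == (k : Int))).map (fun _ => j)).sum
          = if j ∣ (k : Int) ∧ j ≤ (k : Int) then j else 0 := by
        by_cases hmem : (k : Int) ∈ PySem.List.pyRange j m j
        · obtain ⟨h1, h2', h3⟩ := (PySem.List.mem_pyRange_iff_of_pos hj0 _).1 hmem
          have hdvd : j ∣ (k : Int) := by
            have := (dvd_sub_left (dvd_refl j)).1 h3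
            exact this
          rw [if_pos ⟨hdvd, h1⟩]
          exact sum_filter_map_of_mem _ _ _ _ _ (nodup_pyRange_pos j m j hj0)
            (fun a _ b _ h => h) hmem rfl
        · have hneg : ¬ (j ∣ (k : Int) ∧ j ≤ (k : Int)) := by
            intro ⟨hd, hle⟩
            exact hmem ((PySem.List.mem_pyRange_iff_of_pos hj0 _).2
              ⟨hle, by omega, (dvd_sub_left (dvd_refl j)).2 hd⟩)
          rw [if_neg hneg]
          exact sum_filter_map_of_none _ _ _ _ (fun q hq hc => hmem (hc ▸ hq))
      have hSA : SA (j + 1) k = SA j k + (if j ∣ (k : Int) ∧ j ≤ (k : Int) then j else 0) := by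
        unfold SA
        rw [PySem.List.pyRange_one_succ_right (by omega : (2:Int) ≤ j),
          List.filter_append, List.sum_append]
        by_cases hc : j ∣ (k : Int) ∧ j ≤ (k : Int) <;> simp [hc]
      rw [he, hinv k hk, hsum, hSA]
      ring
    rw [List.foldl_cons]
    have hstep : astep m (s, out) j
        = (((PySem.List.pyRange j m j).foldl
            (fun s mul => PySem.List.pySetD s mul (PySem.List.pyGetD s mul 0 + j)) s),
           out ++ [psum j]) := by
      unfold astep
      simp [hyield]
    rw [hstep, ih (j + 1) (by omega) (by omega) (by omega) _ _ hlen' hinv']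
    simp

theorem A_eq_model (m : Int) :
    sdivisors_until m = 0 :: 1 :: (PySem.List.pyRange 2 m 1).map psum := by
  unfold sdivisors_until
  by_cases h : m ≤ 2
  · rw [PySem.List.pyRange_one_eq_nil h]
    simp
  · have hinv0 : ∀ k : Nat, k < m.toNat →
        (List.replicate m.toNat (1 : Int)).getD k 0 = 1 + SA 2 k := by
      intro k hk
      have : SA 2 k = 0 := by
        unfold SA
        rw [PySem.List.pyRange_one_eq_nil (le_refl 2)]
        simp
      rw [this, List.getD_eq_getElem _ _ (by simpa using hk)]
      simp
    rw [A_loop m (m - 2).toNat 2 rfl (le_refl 2) (by omega)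
      (List.replicate m.toNat 1) [] (by simp) hinv0]
    simp

-- B's outer loop adds, entrywise, the pair contributions of each processed d
theorem B_loop (m : Int) : ∀ (ds : List Int), (∀ d ∈ ds, 1 ≤ d) →
    ∀ (res : List Int), res.length = m.toNat →
    ((ds.foldl (bstep m) res).length = m.toNat ∧
     ∀ k : Nat, (ds.foldl (bstep m) res).getD k 0
        = res.getD k 0 + (ds.map (fun d => CB m d k)).sum) := by
  intro ds
  induction ds with
  | nil => intro _ res hlen; simpa using hlen
  | cons d ds ih =>
    intro hds res hlen
    have hd : (1 : Int) ≤ d := hds d (List.mem_cons_self ..)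
    have hd0 : (0 : Int) < d := by omega
    -- the inner loop in φ/g shape
    have hfun : (fun (res : List Int) (q : Int) =>
        let k := d * q
        if d = 1 then PySem.List.pySetD res k (PySem.List.pyGetD res k 0 + 1)
        else if q = d then PySem.List.pySetD res k (PySem.List.pyGetD res k 0 + d)
        else PySem.List.pySetD res k (PySem.List.pyGetD res k 0 + (d + q)))
        = fun t q => PySem.List.pySetD t (d * q)
            (PySem.List.pyGetD t (d * q) 0 + gB d q) := by
      funext t q
      unfold gB
      by_cases h1 : d = 1 <;> by_cases h2 : q = d <;> simp [h1, h2]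
    have hr : ∀ q ∈ PySem.List.pyRange d (PySem.Int.floordiv (m - 1) d + 1) 1,
        0 ≤ d * q ∧ d * q < (res.length : Int) := by
      intro q hq
      obtain ⟨hq1, hq2⟩ := PySem.List.mem_pyRange_one.1 hq
      have hqf : q ≤ PySem.Int.floordiv (m - 1) d := by omega
      have hqm : q * d ≤ m - 1 := (PySem.Int.le_floordiv_iff_mul_le hd0).1 hqf
      have h0 : 0 ≤ d * q := mul_nonneg (by omega) (by omega)
      have h1 : d * q ≤ m - 1 := by rw [mul_comm]; exact hqm
      have hm1 : (1 : Int) ≤ m := by omega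
      refine ⟨h0, ?_⟩
      rw [hlen]
      omega
    have hupd := foldl_update_add (PySem.List.pyRange d (PySem.Int.floordiv (m - 1) d + 1) 1)
      (fun q => d * q) (gB d) res hr
    have hbs : bstep m res d = (PySem.List.pyRange d (PySem.Int.floordiv (m - 1) d + 1) 1).foldl
        (fun t q => PySem.List.pySetD t (d * q) (PySem.List.pyGetD t (d * q) 0 + gB d q)) res := by
      unfold bstep
      rw [hfun]
    have hlen1 : (bstep m res d).length = m.toNat := by
      rw [hbs]
      have := hupd.1
      simpa [hlen] using this
    obtain ⟨ihl, ihe⟩ := ih (fun d' hd' => hds d' (List.mem_cons_of_mem _ hd')) (bstep m res d) hlen1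
    refine ⟨ihl, fun k => ?_⟩
    have hent : (bstep m res d).getD k 0 = res.getD k 0 + CB m d k := by
      rw [hbs]
      have he : ((PySem.List.pyRange d (PySem.Int.floordiv (m - 1) d + 1) 1).foldl
          (fun t q => PySem.List.pySetD t (d * q) (PySem.List.pyGetD t (d * q) 0 + gB d q)) res).getD k 0
          = res.getD k 0 + (((PySem.List.pyRange d (PySem.Int.floordiv (m - 1) d + 1) 1).filter
              (fun q => d * q == (k : Int))).map (gB d)).sum := by
        simpa using hupd.2 k
      have hsum : (((PySem.List.pyRange d (PySem.Int.floordiv (m - 1) d + 1) 1).filter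
          (fun q => d * q == (k : Int))).map (gB d)).sum = CB m d k := by
        by_cases hc : d ∣ (k : Int) ∧ d * d ≤ (k : Int) ∧ (k : Int) < m
        · obtain ⟨hdvd, hsq, hkm⟩ := hc
          have hq0 : d * ((k : Int) / d) = (k : Int) := Int.mul_ediv_cancel' hdvd
          have hdq : d ≤ (k : Int) / d := by
            have : d * d ≤ d * ((k : Int) / d) := by rw [hq0]; exact hsq
            exact le_of_mul_le_mul_left this hd0
          have hmem : (k : Int) / d ∈ PySem.List.pyRange d (PySem.Int.floordiv (m - 1) d + 1) 1 := by
            rw [PySem.List.mem_pyRange_one]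
            have : ((k : Int) / d) * d ≤ m - 1 := by rw [mul_comm, hq0]; omega
            have := (PySem.Int.le_floordiv_iff_mul_le hd0).2 this
            omega
          rw [CB, if_pos ⟨hdvd, hsq, hkm⟩]
          exact sum_filter_map_of_mem _ _ _ _ _
            (PySem.List.nodup_pyRange_one _ _)
            (fun a _ b _ h => mul_left_cancel₀ (by omega) h) hmem hq0
        · rw [CB, if_neg hc]
          refine sum_filter_map_of_none _ _ _ _ (fun q hq hqk => hc ?_)
          obtain ⟨hq1, hq2⟩ := PySem.List.mem_pyRange_one.1 hq
          have hqf : q ≤ PySem.Int.floordiv (m - 1) d := by omega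
          have hqm : q * d ≤ m - 1 := (PySem.Int.le_floordiv_iff_mul_le hd0).1 hqf
          refine ⟨⟨q, hqk.symm⟩, ?_, ?_⟩
          · rw [← hqk]
            exact mul_le_mul_of_nonneg_left hq1 (by omega)
          · rw [← hqk]; rw [mul_comm]; omega
      rw [he, hsum]
    rw [List.foldl_cons, ihe, hent]
    simp [add_assoc]

-- B's pair contribution of d to entry n, written over Nat
def cN (n d : Nat) : Int :=
  if d = 1 then 1 else if n / d = d then (d : Int) else (d : Int) + ((n / d : Nat) : Int)

theorem list_sum_filter_ite (l : List Int) (p : Int → Bool) :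
    (l.filter p).sum = (l.map (fun x => if p x then x else 0)).sum := by
  induction l with
  | nil => simp
  | cons a l ih =>
    rw [List.filter_cons, List.map_cons, List.sum_cons, ← ih]
    by_cases h : p a <;> simp [h]

-- the divisor-pairing argument over Nat: summing the pair contribution over the
-- divisors d with d*d ≤ n equals 1 plus the sum of all divisors in [2, n)
theorem pairing_nat (n : Nat) (h2 : 2 ≤ n) :
    ∑ d ∈ n.divisors.filter (fun d => d * d ≤ n), cN n d
      = 1 + ∑ d ∈ n.divisors.filter (fun d => 2 ≤ d ∧ d < n), (d : Int) := by
  have hn0 : n ≠ 0 := by omega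
  have hdpos : ∀ d, d ∣ n → 1 ≤ d := by
    intro d hd
    rcases Nat.eq_zero_or_pos d with rfl | h
    · exact absurd (Nat.eq_zero_of_zero_dvd hd) hn0
    · omega
  set L := n.divisors.filter (fun d => 2 ≤ d ∧ d * d < n) with hL
  set E := n.divisors.filter (fun d => 2 ≤ d ∧ d * d = n) with hE
  set G := n.divisors.filter (fun d => d < n ∧ n < d * d) with hG
  have h1S : 1 ∈ n.divisors.filter (fun d => d * d ≤ n) := by
    simp [Nat.mem_divisors, hn0]; omega
  rw [← Finset.add_sum_erase _ (cN n) h1S]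
  have hc1 : cN n 1 = 1 := by simp [cN]
  have hT : (n.divisors.filter (fun d => d * d ≤ n)).erase 1 = L ∪ E := by
    ext d
    simp only [hL, hE, Finset.mem_erase, Finset.mem_filter, Finset.mem_union, Nat.mem_divisors]
    constructor
    · rintro ⟨hne, ⟨hdvd, -⟩, hsq⟩
      have h1d := hdpos d hdvd
      rcases lt_or_eq_of_le hsq with h | h
      · exact Or.inl ⟨⟨hdvd, hn0⟩, by omega, h⟩
      · exact Or.inr ⟨⟨hdvd, hn0⟩, by omega, h⟩
    · rintro (⟨⟨hdvd, -⟩, h2d, h⟩ | ⟨⟨hdvd, -⟩, h2d, h⟩) <;>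
        exact ⟨by omega, ⟨hdvd, hn0⟩, by omega⟩
  have hdisjLE : Disjoint L E := by
    rw [Finset.disjoint_left]
    intro d hdl hde
    simp only [hL, hE, Finset.mem_filter] at hdl hde
    omega
  rw [hc1, hT, Finset.sum_union hdisjLE]
  have hEsum : ∑ d ∈ E, cN n d = ∑ d ∈ E, (d : Int) := by
    refine Finset.sum_congr rfl (fun d hd => ?_)
    simp only [hE, Finset.mem_filter, Nat.mem_divisors] at hd
    obtain ⟨⟨hdvd, -⟩, h2d, he⟩ := hd
    have hdiv : n / d = d := by rw [← he]; exact Nat.mul_div_cancel_left d (by omega)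
    simp [cN, hdiv, show d ≠ 1 by omega]
  have hLsum : ∑ d ∈ L, cN n d = ∑ d ∈ L, ((d : Int) + ((n / d : Nat) : Int)) := by
    refine Finset.sum_congr rfl (fun d hd => ?_)
    simp only [hL, Finset.mem_filter, Nat.mem_divisors] at hd
    obtain ⟨⟨hdvd, -⟩, h2d, hlt⟩ := hd
    have hdiv : n / d ≠ d := by
      intro he
      have := Nat.mul_div_cancel' hdvd
      rw [he] at this
      omega
    simp [cN, hdiv, show d ≠ 1 by omega]
  rw [hEsum, hLsum, Finset.sum_add_distrib]
  have hLG : ∑ d ∈ L, ((n / d : Nat) : Int) = ∑ g ∈ G, (g : Int) := by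
    refine Finset.sum_nbij' (fun d => n / d) (fun g => n / g) ?_ ?_ ?_ ?_ ?_
    · intro d hd
      simp only [hL, hG, Finset.mem_filter, Nat.mem_divisors] at hd ⊢
      obtain ⟨⟨hdvd, -⟩, h2d, hlt⟩ := hd
      have hq := Nat.mul_div_cancel' hdvd
      have hdq : d < n / d := by
        by_contra hle
        rw [Nat.not_lt] at hle
        have : d * (n / d) ≤ d * d := Nat.mul_le_mul_left d hle
        omega
      refine ⟨⟨Nat.div_dvd_of_dvd hdvd, hn0⟩, Nat.div_lt_self (by omega) (by omega), ?_⟩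
      calc n = d * (n / d) := hq.symm
        _ < (n / d) * (n / d) := by
            exact Nat.mul_lt_mul_of_lt_of_le hdq (le_refl _) (by omega)
    · intro g hg
      simp only [hL, hG, Finset.mem_filter, Nat.mem_divisors] at hg ⊢
      obtain ⟨⟨hgv, -⟩, hgn, hnlt⟩ := hg
      have hp := Nat.mul_div_cancel' hgv
      have hp1 : 1 ≤ n / g := hdpos _ (Nat.div_dvd_of_dvd hgv)
      have hpg : n / g < g := by
        by_contra hle
        rw [Nat.not_lt] at hle
        have : g * g ≤ g * (n / g) := Nat.mul_le_mul_left g hle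
        omega
      have hp2 : 2 ≤ n / g := by
        have hne : n / g ≠ 1 := by
          intro h1
          rw [h1, mul_one] at hp
          omega
        omega
      refine ⟨⟨Nat.div_dvd_of_dvd hgv, hn0⟩, hp2, ?_⟩
      calc (n / g) * (n / g) < g * (n / g) := by
            exact Nat.mul_lt_mul_of_lt_of_le hpg (le_refl _) (by omega)
        _ = n := hp
    · intro d hd
      simp only [hL, Finset.mem_filter, Nat.mem_divisors] at hd
      exact Nat.div_div_self hd.1.1 hn0
    · intro g hg
      simp only [hG, Finset.mem_filter, Nat.mem_divisors] at hg
      exact Nat.div_div_self hg.1.1 hn0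
    · intro d hd
      rfl
  have hRsplit : n.divisors.filter (fun d => 2 ≤ d ∧ d < n) = (L ∪ E) ∪ G := by
    ext d
    simp only [hL, hE, hG, Finset.mem_filter, Finset.mem_union, Nat.mem_divisors]
    constructor
    · rintro ⟨⟨hdvd, -⟩, h2d, hdn⟩
      rcases Nat.lt_trichotomy (d * d) n with h | h | h
      · exact Or.inl (Or.inl ⟨⟨hdvd, hn0⟩, h2d, h⟩)
      · exact Or.inl (Or.inr ⟨⟨hdvd, hn0⟩, h2d, h⟩)
      · exact Or.inr ⟨⟨hdvd, hn0⟩, hdn, h⟩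
    · have hlt_self : ∀ e : Nat, 2 ≤ e → e < e * e := fun e he => Nat.lt_mul_self_iff.mpr he
      rintro ((⟨⟨hdvd, -⟩, h2d, h⟩ | ⟨⟨hdvd, -⟩, h2d, h⟩) | ⟨⟨hdvd, -⟩, hdn, h⟩)
      · exact ⟨⟨hdvd, hn0⟩, h2d, by have := hlt_self d h2d; omega⟩
      · exact ⟨⟨hdvd, hn0⟩, h2d, by have := hlt_self d h2d; omega⟩
      · have h1d := hdpos d hdvd
        have h2d : 2 ≤ d := by
          rcases Nat.lt_or_ge d 2 with hlt | hge
          · have hd1 : d = 1 := by omega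
            rw [hd1, mul_one] at h
            omega
          · exact hge
        exact ⟨⟨hdvd, hn0⟩, h2d, hdn⟩
  have hdisj1 : Disjoint (L ∪ E) G := by
    rw [Finset.disjoint_left]
    intro d hdl hdg
    simp only [hL, hE, hG, Finset.mem_filter, Finset.mem_union] at hdl hdg
    rcases hdl with h | h <;> omega
  rw [hRsplit, Finset.sum_union hdisj1, Finset.sum_union hdisjLE, hLG]
  ring

-- bridge: CB over the Int range [1, m) is the Nat pair contribution over divisors
theorem CB_cast (m i : Int) (h2 : 2 ≤ i) (him : i < m) (d : Nat) :
    CB m (d : Int) i.toNat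
      = if d ∣ i.toNat ∧ d * d ≤ i.toNat then cN i.toNat d else 0 := by
  have hni : ((i.toNat : Int)) = i := by omega
  have hdv : ((i.toNat : Int)) / (d : Int) = ((i.toNat / d : Nat) : Int) :=
    (Int.natCast_ediv i.toNat d).symm
  by_cases hP : d ∣ i.toNat ∧ d * d ≤ i.toNat
  · have hPi : (d : Int) ∣ (i.toNat : Int) ∧ (d : Int) * (d : Int) ≤ (i.toNat : Int)
        ∧ (i.toNat : Int) < m :=
      ⟨Int.natCast_dvd_natCast.2 hP.1, by exact_mod_cast hP.2, by omega⟩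
    rw [CB, if_pos hPi, if_pos hP, gB, hdv, cN]
    by_cases h1 : d = 1
    · simp [h1]
    · rw [if_neg (fun h => h1 (by exact_mod_cast h)), if_neg h1]
      by_cases he : i.toNat / d = d
      · rw [if_pos (by exact_mod_cast he), if_pos he]
      · rw [if_neg (fun h => he (by exact_mod_cast h)), if_neg he]
  · rw [CB, if_neg, if_neg hP]
    rintro ⟨ha, hb, -⟩
    exact hP ⟨Int.natCast_dvd_natCast.1 ha, by exact_mod_cast hb⟩

-- the divisor-pairing argument: summing d (and its cofactor) over the divisors
-- d ≤ √n equals summing all divisors in [2, n), plus 1 for the divisor 1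
theorem pair_sum (m i : Int) (h2 : 2 ≤ i) (him : i < m) :
    ((PySem.List.pyRange 1 m 1).map (fun d => CB m d i.toNat)).sum = psum i := by
  have hn2 : 2 ≤ i.toNat := by omega
  have hni : ((i.toNat : Int)) = i := by omega
  have hn0 : i.toNat ≠ 0 := by omega
  have hdpos : ∀ d, d ∣ i.toNat → 1 ≤ d := by
    intro d hd
    rcases Nat.eq_zero_or_pos d with rfl | h
    · exact absurd (Nat.eq_zero_of_zero_dvd hd) hn0
    · omega
  -- LHS as a Finset sum over [1, (m-1).toNat + 1)
  have hLHS : ((PySem.List.pyRange 1 m 1).map (fun d => CB m d i.toNat)).sum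
      = ∑ d ∈ Finset.Ico 1 ((m - 1).toNat + 1), CB m (d : Int) i.toNat := by
    rw [PySem.List.pyRange_one 1 m, List.map_map, Finset.sum_Ico_eq_sum_range]
    simp only [Nat.add_sub_cancel]
    show (∑ t ∈ Finset.range (m - 1).toNat, CB m (1 + (t : Int)) i.toNat) = _
    refine Finset.sum_congr rfl (fun t _ => ?_)
    have hc : ((1 + t : Nat) : Int) = 1 + (t : Int) := by push_cast; ring
    rw [hc]
  rw [hLHS]
  have hrw : ∀ d ∈ Finset.Ico 1 ((m - 1).toNat + 1),
      CB m (d : Int) i.toNat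
        = if d ∣ i.toNat ∧ d * d ≤ i.toNat then cN i.toNat d else 0 :=
    fun d _ => CB_cast m i h2 him d
  rw [Finset.sum_congr rfl hrw, ← Finset.sum_filter]
  have hset : (Finset.Ico 1 ((m - 1).toNat + 1)).filter
        (fun d => d ∣ i.toNat ∧ d * d ≤ i.toNat)
      = i.toNat.divisors.filter (fun d => d * d ≤ i.toNat) := by
    ext d
    simp only [Finset.mem_filter, Finset.mem_Ico, Nat.mem_divisors]
    constructor
    · rintro ⟨-, hdv, hsq⟩
      exact ⟨⟨hdv, hn0⟩, hsq⟩
    · rintro ⟨⟨hdv, -⟩, hsq⟩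
      have h1d := hdpos d hdv
      have hdn : d ≤ i.toNat := Nat.le_of_dvd (by omega) hdv
      exact ⟨⟨h1d, by omega⟩, hdv, hsq⟩
  rw [hset, pairing_nat i.toNat hn2]
  -- RHS: psum
  have hSA : SA i i.toNat
      = ∑ d ∈ i.toNat.divisors.filter (fun d => 2 ≤ d ∧ d < i.toNat), (d : Int) := by
    unfold SA
    rw [list_sum_filter_ite, PySem.List.pyRange_one 2 i, List.map_map]
    have hIco : (∑ t ∈ Finset.range (i - 2).toNat,
        (if decide ((2 + (t : Int)) ∣ (i.toNat : Int) ∧ 2 + (t : Int) ≤ (i.toNat : Int))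
          then 2 + (t : Int) else 0))
        = ∑ d ∈ Finset.Ico 2 ((i - 2).toNat + 2),
          (if decide ((d : Int) ∣ (i.toNat : Int) ∧ (d : Int) ≤ (i.toNat : Int))
            then (d : Int) else 0) := by
      rw [Finset.sum_Ico_eq_sum_range]
      simp only [Nat.add_sub_cancel]
      refine Finset.sum_congr rfl (fun t _ => ?_)
      have hc : ((2 + t : Nat) : Int) = 2 + (t : Int) := by push_cast; ring
      rw [hc]
    show (∑ t ∈ Finset.range (i - 2).toNat,
        (if decide ((2 + (t : Int)) ∣ (i.toNat : Int) ∧ 2 + (t : Int) ≤ (i.toNat : Int))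
          then 2 + (t : Int) else 0)) = _
    rw [hIco]
    have hrw2 : ∀ d ∈ Finset.Ico 2 ((i - 2).toNat + 2),
        (if decide ((d : Int) ∣ (i.toNat : Int) ∧ (d : Int) ≤ (i.toNat : Int))
          then (d : Int) else 0)
        = if d ∣ i.toNat ∧ d ≤ i.toNat then (d : Int) else 0 := by
      intro d _
      by_cases h : d ∣ i.toNat ∧ d ≤ i.toNat
      · rw [if_pos h, if_pos]
        simp only [decide_eq_true_eq]
        exact ⟨Int.natCast_dvd_natCast.2 h.1, by exact_mod_cast h.2⟩
      · rw [if_neg h, if_neg]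
        simp only [decide_eq_true_eq]
        rintro ⟨ha, hb⟩
        exact h ⟨Int.natCast_dvd_natCast.1 ha, by exact_mod_cast hb⟩
    rw [Finset.sum_congr rfl hrw2, ← Finset.sum_filter]
    have hset2 : (Finset.Ico 2 ((i - 2).toNat + 2)).filter
          (fun d => d ∣ i.toNat ∧ d ≤ i.toNat)
        = i.toNat.divisors.filter (fun d => 2 ≤ d ∧ d < i.toNat) := by
      ext d
      simp only [Finset.mem_filter, Finset.mem_Ico, Nat.mem_divisors]
      constructor
      · rintro ⟨⟨h2d, hup⟩, hdv, hle⟩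
        refine ⟨⟨hdv, hn0⟩, h2d, ?_⟩
        omega
      · rintro ⟨⟨hdv, -⟩, h2d, hlt⟩
        exact ⟨⟨h2d, by omega⟩, hdv, by omega⟩
    rw [hset2]
  rw [psum, hSA]

theorem B_eq_model (m : Int) :
    sdivisors_until_alt m = 0 :: 1 :: (PySem.List.pyRange 2 m 1).map psum := by
  obtain ⟨hlen, hent⟩ := B_loop m (PySem.List.pyRange 1 m 1)
    (fun d hd => (PySem.List.mem_pyRange_one.1 hd).1)
    (List.replicate m.toNat 0) (by simp)
  unfold sdivisors_until_alt
  refine congrArg (fun l => 0 :: 1 :: l) (List.map_congr_left ?_)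
  intro i hi
  obtain ⟨h2, him⟩ := PySem.List.mem_pyRange_one.1 hi
  have hil : (i : Int) < (((PySem.List.pyRange 1 m 1).foldl (bstep m)
      (List.replicate m.toNat 0)).length : Int) := by rw [hlen]; omega
  rw [PySem.List.pyGetD_eq_getElem _ 0 (by omega) hil]
  rw [← List.getD_eq_getElem _ 0 (by rw [hlen]; omega)]
  rw [hent i.toNat]
  have hrep : (List.replicate m.toNat (0 : Int)).getD i.toNat 0 = 0 := by
    rw [List.getD_eq_getElem _ _ (by simp; omega)]
    simp
  rw [hrep]
  have hcast : ((i.toNat : Int)) = i := by omega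
  rw [show ((PySem.List.pyRange 1 m 1).map (fun d => CB m d i.toNat)).sum = psum i from
    by rw [← pair_sum m i h2 him]]
  ring

-- ===== VERDICT (by name: the statement is the Claim_ definition above) =====
theorem sdivisors_until_spec : Claim_equal_sdivisors_until := by
  intro m _
  unfold Spec_sdivisors_until
  rw [A_eq_model, B_eq_model]
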